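-- pv_equiv track=rewrite | github.com/corbata-research/Corbata-code | corbata_rsa_prime_generator.py | generate_corbata_row_local
-- ===== SOURCE A (Python) =====
-- def generate_corbata_row_local(r):
--     """Return the r-th Corbata row as a list of integers."""
--     if r == 1:
--         return [1]
--
--     L = (r - 2)**2 + 2
--
--     if r == 2:
--         return [L]
--
--     row_len = r - 1
--     row = [0] * row_len
--     row[0] = L
--
--     if r % 2 == 0:
--         k = r // 2
--         negcount = k - 1
--         idx = 0
--
--         for p in range(negcount - 1, -1, -1):
--             idx += 1
--             diff_val = -2 * (k + p - 1)
--             row[idx] = row[idx - 1] + diff_val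
--
--         for t in range(1, negcount + 1):
--             idx += 1
--             diff_val = 2 * (k + t)
--             row[idx] = row[idx - 1] + diff_val
--
--     else:
--         k = (r - 1) // 2
--         idx = 0
--
--         for s in range(k - 2, -1, -1):
--             idx += 1
--             diff_val = -2 * (k + s)
--             row[idx] = row[idx - 1] + diff_val
--
--         idx += 1
--         row[idx] = row[idx - 1] + 2
--
--         for t in range(2, k + 1):
--             idx += 1
--             diff_val = 2 * (k + t)
--             row[idx] = row[idx - 1] + diff_val
--
--     return row
-- ===== SOURCE B (Python) =====
-- def generate_corbata_row_local(r):
--     """Return the r-th Corbata row, each element computed by a closed formula."""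
--     if r == 1:
--         return [1]
--     L = (r - 2) ** 2 + 2
--     if r == 2:
--         return [L]
--     if r % 2 == 0:
--         k = r // 2
--         n = k - 1
--
--         def elem(i):
--             if i <= n:
--                 return L + i * i + i * (5 - 4 * k)
--             t = i - n
--             return L + n * n + n * (5 - 4 * k) + 2 * k * t + t * (t + 1)
--     else:
--         k = (r - 1) // 2
--
--         def elem(i):
--             if i <= k - 1:
--                 return L + i * i + i * (3 - 4 * k)
--             u = i - k
--             mid = L + (k - 1) ** 2 + (k - 1) * (3 - 4 * k) + 2
--             return mid + 2 * k * u + u * (u + 1) + 2 * u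
--     return [elem(i) for i in range(r - 1)]
-- ===== Notes on version B (the rewrite author's own statement) =====
-- stated objective: alternative
-- what changed: Each row element is computed directly from its index by a piecewise quadratic closed form (derived by summing the arithmetic diffs), replacing A's sequential running-sum loops that build row[i] from row[i-1]; trades the running accumulator for per-index formulas of the same O(r) cost.
-- outside the precondition, e.g. on generate_corbata_row_local(0): A raises IndexError, B returns []
import Mathlib
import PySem

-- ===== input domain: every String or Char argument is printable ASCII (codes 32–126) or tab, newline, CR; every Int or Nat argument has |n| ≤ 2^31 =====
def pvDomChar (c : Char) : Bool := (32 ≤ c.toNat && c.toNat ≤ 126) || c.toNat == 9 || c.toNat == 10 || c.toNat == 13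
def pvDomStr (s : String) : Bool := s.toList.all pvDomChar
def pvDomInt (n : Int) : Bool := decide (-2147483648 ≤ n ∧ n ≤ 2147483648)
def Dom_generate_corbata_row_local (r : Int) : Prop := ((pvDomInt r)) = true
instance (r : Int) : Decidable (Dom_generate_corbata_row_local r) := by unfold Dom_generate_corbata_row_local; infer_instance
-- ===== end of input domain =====

-- B computes each row element by a piecewise quadratic closed form in its index instead of A's
-- running-sum loops (alternative decomposition, same O(r) cost); return values proved equal for r >= 1.


-- ===== PORT A =====
def generate_corbata_row_local (r : Int) : List Int :=
  if r = 1 then [1]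
  else
    let L := (r - 2) ^ 2 + 2
    if r = 2 then [L]
    else
      let row_len := r - 1
      let row := List.replicate row_len.toNat (0 : Int)
      let row := PySem.List.pySetD row 0 L
      if PySem.Int.mod r 2 = 0 then
        let k := PySem.Int.floordiv r 2
        let negcount := k - 1
        let idx : Int := 0
        let st := (PySem.List.pyRange (negcount - 1) (-1) (-1)).foldl
          (fun (st : List Int × Int) p =>
            let idx := st.2 + 1
            let diff_val := -2 * (k + p - 1)
            (PySem.List.pySetD st.1 idx (PySem.List.pyGetD st.1 (idx - 1) 0 + diff_val), idx))
          (row, idx)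
        let st := (PySem.List.pyRange 1 (negcount + 1) 1).foldl
          (fun (st : List Int × Int) t =>
            let idx := st.2 + 1
            let diff_val := 2 * (k + t)
            (PySem.List.pySetD st.1 idx (PySem.List.pyGetD st.1 (idx - 1) 0 + diff_val), idx))
          st
        st.1
      else
        let k := PySem.Int.floordiv (r - 1) 2
        let idx : Int := 0
        let st := (PySem.List.pyRange (k - 2) (-1) (-1)).foldl
          (fun (st : List Int × Int) s =>
            let idx := st.2 + 1
            let diff_val := -2 * (k + s)
            (PySem.List.pySetD st.1 idx (PySem.List.pyGetD st.1 (idx - 1) 0 + diff_val), idx))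
          (row, idx)
        let idx := st.2 + 1
        let row := PySem.List.pySetD st.1 idx (PySem.List.pyGetD st.1 (idx - 1) 0 + 2)
        let st := (PySem.List.pyRange 2 (k + 1) 1).foldl
          (fun (st : List Int × Int) t =>
            let idx := st.2 + 1
            let diff_val := 2 * (k + t)
            (PySem.List.pySetD st.1 idx (PySem.List.pyGetD st.1 (idx - 1) 0 + diff_val), idx))
          (row, idx)
        st.1

-- ===== PORT B =====
def pvElemEven (L k n i : Int) : Int :=
  if i ≤ n then L + i * i + i * (5 - 4 * k)
  else
    let t := i - n
    L + n * n + n * (5 - 4 * k) + 2 * k * t + t * (t + 1)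

def pvElemOdd (L k i : Int) : Int :=
  if i ≤ k - 1 then L + i * i + i * (3 - 4 * k)
  else
    let u := i - k
    let mid := L + (k - 1) ^ 2 + (k - 1) * (3 - 4 * k) + 2
    mid + 2 * k * u + u * (u + 1) + 2 * u

def generate_corbata_row_local_alt (r : Int) : List Int :=
  if r = 1 then [1]
  else
    let L := (r - 2) ^ 2 + 2
    if r = 2 then [L]
    else if PySem.Int.mod r 2 = 0 then
      let k := PySem.Int.floordiv r 2
      let n := k - 1
      (PySem.List.pyRange 0 (r - 1) 1).map (fun i => pvElemEven L k n i)
    else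
      let k := PySem.Int.floordiv (r - 1) 2
      (PySem.List.pyRange 0 (r - 1) 1).map (fun i => pvElemOdd L k i)

-- ===== PRECONDITION & SPEC =====
-- Pre_ excludes r ≤ 0, where Python A raises IndexError assigning row[0] into the empty buffer [0]*(r-1).
def Pre_generate_corbata_row_local (r : Int) : Prop := 1 ≤ r
instance (r : Int) : Decidable (Pre_generate_corbata_row_local r) := by unfold Pre_generate_corbata_row_local; infer_instance
def pvWitness_generate_corbata_row_local : Int := 6

def Spec_generate_corbata_row_local (r : Int) (out : List Int) : Prop := out = generate_corbata_row_local_alt r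
instance (r : Int) (out : List Int) : Decidable (Spec_generate_corbata_row_local r out) := by unfold Spec_generate_corbata_row_local; infer_instance

-- ===== CLAIM (what is proved, stated in full; the proofs are below) =====
def Claim_equal_generate_corbata_row_local : Prop := ∀ (r : Int), Dom_generate_corbata_row_local r → Pre_generate_corbata_row_local r → Spec_generate_corbata_row_local r (generate_corbata_row_local r)

-- ===== LEMMAS AND PROOFS =====

/-- Invariant for A's running-sum loops: folding the shared loop body over a list `ps` of
range values, starting from a state whose index is `m` and whose row holds `g m` at `m`,
writes `g` at positions `m+1 .. m+ps.length` and leaves everything else unchanged. -/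
lemma pvLoop (f : Int → Int) (g : Nat → Int) :
    ∀ (ps : List Int) (st0 : List Int × Int) (m : Nat),
      st0.2 = (m : Int) →
      st0.1.getD m 0 = g m →
      (∀ j : Nat, j < ps.length → g (m + j + 1) = g (m + j) + f (ps.getD j 0)) →
      m + ps.length < st0.1.length →
      (ps.foldl
          (fun (st : List Int × Int) p =>
            (PySem.List.pySetD st.1 (st.2 + 1) (PySem.List.pyGetD st.1 (st.2 + 1 - 1) 0 + f p), st.2 + 1))
          st0).2 = ((m + ps.length : Nat) : Int) ∧
      (ps.foldl
          (fun (st : List Int × Int) p =>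
            (PySem.List.pySetD st.1 (st.2 + 1) (PySem.List.pyGetD st.1 (st.2 + 1 - 1) 0 + f p), st.2 + 1))
          st0).1.length = st0.1.length ∧
      ∀ i : Nat,
        (ps.foldl
          (fun (st : List Int × Int) p =>
            (PySem.List.pySetD st.1 (st.2 + 1) (PySem.List.pyGetD st.1 (st.2 + 1 - 1) 0 + f p), st.2 + 1))
          st0).1.getD i 0 = if m < i ∧ i ≤ m + ps.length then g i else st0.1.getD i 0 := by
  intro ps
  induction ps with
  | nil =>
    intro st0 m h2 hrow hdiff hlen
    refine ⟨by simpa using h2, by simp, ?_⟩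
    intro i
    have : ¬ (m < i ∧ i ≤ m + List.length ([] : List Int)) := by simp only [List.length_nil]; omega
    simp only [List.foldl_nil, if_neg this]
  | cons p ps ih =>
    intro st0 m h2 hrow hdiff hlen
    obtain ⟨row, t⟩ := st0
    simp only at h2 hrow hlen
    subst h2
    simp only [List.foldl_cons]
    have hm1 : (m : Int) + 1 = ((m + 1 : Nat) : Int) := by push_cast; ring
    have hget : PySem.List.pyGetD row ((m : Int) + 1 - 1) 0 = g m := by
      have e : (m : Int) + 1 - 1 = (m : Int) := by ring
      rw [e, PySem.List.pyGetD_natCast]; exact hrow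
    have hval : g m + f p = g (m + 1) := by
      have h := hdiff 0 (by simp)
      simp only [Nat.add_zero, List.getD_cons_zero] at h
      exact h.symm
    have hmlt : m + 1 < row.length := by simp only [List.length_cons] at hlen; omega
    have hrow' : (row.set (m + 1) (g (m + 1))).getD (m + 1) 0 = g (m + 1) := by
      rw [List.getD_eq_getElem _ _ (by simpa using hmlt)]
      simp
    have hdiff' : ∀ j : Nat, j < ps.length → g (m + 1 + j + 1) = g (m + 1 + j) + f (ps.getD j 0) := by
      intro j hj
      have h := hdiff (j + 1) (by simp only [List.length_cons]; omega)
      have e1 : m + (j + 1) + 1 = m + 1 + j + 1 := by omega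
      have e2 : m + (j + 1) = m + 1 + j := by omega
      rw [e1, e2, List.getD_cons_succ] at h
      exact h
    have hlen' : m + 1 + ps.length < (row.set (m + 1) (g (m + 1))).length := by
      simp only [List.length_set, List.length_cons] at hlen ⊢; omega
    have h := ih (row.set (m + 1) (g (m + 1)), ((m + 1 : Nat) : Int)) (m + 1) rfl hrow' hdiff' hlen'
    rw [hget, hval, hm1, PySem.List.pySetD_natCast]
    refine ⟨?_, ?_, ?_⟩
    · rw [h.1]; congr 1; simp only [List.length_cons]; omega
    · rw [h.2.1]; simp
    · intro i
      rw [h.2.2 i]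
      by_cases hi : m + 1 < i ∧ i ≤ m + 1 + ps.length
      · rw [if_pos hi, if_pos (by simp only [List.length_cons]; omega)]
      · by_cases him : i = m + 1
        · subst him
          rw [if_neg hi, if_pos (by simp only [List.length_cons]; omega)]
          exact hrow'
        · rw [if_neg hi, if_neg (by simp only [List.length_cons]; omega)]
          rw [List.getD_eq_getElem?_getD, List.getD_eq_getElem?_getD, List.getElem?_set_ne (by omega)]

lemma pvEvenCase (c : Nat) :
    generate_corbata_row_local (2 * (c : Int) + 4) = generate_corbata_row_local_alt (2 * (c : Int) + 4) := by
  have h1 : ¬ (2 * (c : Int) + 4 = 1) := by omega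
  have h2 : ¬ (2 * (c : Int) + 4 = 2) := by omega
  have hm : PySem.Int.mod (2 * (c : Int) + 4) 2 = 0 := by
    rw [PySem.Int.mod_eq_emod_of_pos (by norm_num)]; omega
  have hk : PySem.Int.floordiv (2 * (c : Int) + 4) 2 = (c : Int) + 2 := by
    rw [PySem.Int.floordiv_eq_ediv_of_pos (by norm_num)]; omega
  simp only [generate_corbata_row_local, generate_corbata_row_local_alt, if_neg h1, if_neg h2, hm,
    if_pos, hk]
  have e1 : (c : Int) + 2 - 1 - 1 = (c : Int) := by ring
  have e2 : (c : Int) + 2 - 1 + 1 = (c : Int) + 2 := by ring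
  have e3 : (2 * (c : Int) + 4 - 1).toNat = 2 * c + 3 := by omega
  have e4 : (2 * (c : Int) + 4 - 2) = 2 * (c : Int) + 2 := by ring
  have e5 : (c : Int) + 2 - 1 = (c : Int) + 1 := by ring
  have e6 : 2 * (c : Int) + 4 - 1 = 2 * (c : Int) + 3 := by ring
  rw [e1, e2, e3, e4, e5, e6]
  have hps1 : PySem.List.pyRange (c : Int) (-1) (-1)
      = (List.range (c + 1)).map (fun j : Nat => (c : Int) - j) := by
    rw [PySem.List.pyRange_neg_one, show ((c : Int) - -1).toNat = c + 1 by omega]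
  have hps2 : PySem.List.pyRange 1 ((c : Int) + 2) 1
      = (List.range (c + 1)).map (fun j : Nat => 1 + (j : Int)) := by
    rw [PySem.List.pyRange_one, show ((c : Int) + 2 - 1).toNat = c + 1 by omega]
  have hpsB : PySem.List.pyRange 0 (2 * (c : Int) + 3) 1
      = (List.range (2 * c + 3)).map (fun j : Nat => 0 + (j : Int)) := by
    rw [PySem.List.pyRange_one, show (2 * (c : Int) + 3 - 0).toNat = 2 * c + 3 by omega]
  have hrow0 : PySem.List.pySetD (List.replicate (2 * c + 3) (0 : Int)) 0 ((2 * (c : Int) + 2) ^ 2 + 2)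
      = (List.replicate (2 * c + 3) (0 : Int)).set 0 ((2 * (c : Int) + 2) ^ 2 + 2) := by
    rw [PySem.List.pySetD_of_nonneg _ _ (by norm_num)]; norm_num
  rw [hps1, hps2, hpsB, hrow0]
  set L : Int := (2 * (c : Int) + 2) ^ 2 + 2 with hL
  set g : Nat → Int := fun i => pvElemEven L ((c : Int) + 2) ((c : Int) + 1) (i : Int) with hg
  set row0 : List Int := (List.replicate (2 * c + 3) (0 : Int)).set 0 L with hrow0'
  -- first loop
  have hgz : g 0 = L := by
    simp only [hg, pvElemEven, Nat.cast_zero]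
    rw [if_pos (by omega)]
    ring
  have hg0 : row0.getD 0 0 = g 0 := by
    rw [hgz, hrow0', List.getD_eq_getElem _ _ (by simp)]
    simp
  have hdiff1 : ∀ j : Nat, j < ((List.range (c + 1)).map (fun j : Nat => (c : Int) - j)).length →
      g (0 + j + 1) = g (0 + j) + (fun p => -2 * ((c : Int) + 2 + p - 1)) (((List.range (c + 1)).map (fun j : Nat => (c : Int) - j)).getD j 0) := by
    intro j hj
    simp only [List.length_map, List.length_range] at hj
    have hgd : ((List.range (c + 1)).map (fun j : Nat => (c : Int) - j)).getD j 0 = (c : Int) - j := by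
      rw [List.getD_eq_getElem _ _ (by simp [hj])]
      simp
    rw [hgd]
    simp only [hg, Nat.zero_add, pvElemEven]
    rw [if_pos (by omega), if_pos (by omega)]
    push_cast
    ring
  have h1loop := pvLoop (fun p => -2 * ((c : Int) + 2 + p - 1)) g
    ((List.range (c + 1)).map (fun j : Nat => (c : Int) - j)) (row0, 0) 0 (by norm_num) hg0 hdiff1
    (by simp only [hrow0', List.length_set, List.length_replicate, List.length_map,
      List.length_range]; omega)
  obtain ⟨ha1, ha2, ha3⟩ := h1loop
  set res1 : List Int × Int := List.foldl
      (fun (st : List Int × Int) p =>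
        (PySem.List.pySetD st.1 (st.2 + 1) (PySem.List.pyGetD st.1 (st.2 + 1 - 1) 0 + -2 * ((c : Int) + 2 + p - 1)), st.2 + 1))
      (row0, 0) ((List.range (c + 1)).map (fun j : Nat => (c : Int) - j)) with hres1
  have hg1 : res1.1.getD (c + 1) 0 = g (c + 1) := by
    rw [ha3]
    rw [if_pos ⟨by omega, by simp only [List.length_map, List.length_range]; omega⟩]
  have hdiff2 : ∀ j : Nat, j < ((List.range (c + 1)).map (fun j : Nat => 1 + (j : Int))).length →
      g (c + 1 + j + 1) = g (c + 1 + j) + (fun t => 2 * ((c : Int) + 2 + t)) (((List.range (c + 1)).map (fun j : Nat => 1 + (j : Int))).getD j 0) := by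
    intro j hj
    simp only [List.length_map, List.length_range] at hj
    have hgd : ((List.range (c + 1)).map (fun j : Nat => 1 + (j : Int))).getD j 0 = 1 + (j : Int) := by
      rw [List.getD_eq_getElem _ _ (by simp [hj])]
      simp
    rw [hgd]
    simp only [hg, pvElemEven]
    rw [if_neg (by omega)]
    by_cases hj0 : j = 0
    · subst hj0
      rw [if_pos (by omega)]
      push_cast
      ring
    · rw [if_neg (by omega)]
      push_cast
      ring
  have h2loop := pvLoop (fun t => 2 * ((c : Int) + 2 + t)) g
    ((List.range (c + 1)).map (fun j : Nat => 1 + (j : Int))) res1 (c + 1)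
    (by rw [ha1]; norm_num) hg1 hdiff2
    (by rw [ha2]; simp only [hrow0', List.length_set, List.length_replicate, List.length_map,
      List.length_range]; omega)
  obtain ⟨hb1, hb2, hb3⟩ := h2loop
  apply List.ext_getElem
  · rw [hb2, ha2]
    simp [hrow0']
  · intro i hi1 hi2
    have hilen : i < 2 * c + 3 := by
      rw [hb2, ha2] at hi1
      simpa [hrow0'] using hi1
    rw [← List.getD_eq_getElem _ 0 hi1, hb3]
    have hrhs : (List.map (fun i => pvElemEven L ((c : Int) + 2) ((c : Int) + 1) i)
        ((List.range (2 * c + 3)).map (fun j : Nat => 0 + (j : Int))))[i] = g i := by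
      simp [hg]
    rw [hrhs]
    simp only [List.length_map, List.length_range]
    by_cases hc2 : c + 1 < i ∧ i ≤ c + 1 + (c + 1)
    · rw [if_pos hc2]
    · rw [if_neg hc2, ha3]
      by_cases hc1 : 0 < i ∧ i ≤ 0 + (c + 1)
      · rw [if_pos (by simp only [List.length_map, List.length_range]; omega)]
      · rw [if_neg (by simp only [List.length_map, List.length_range]; omega)]
        have hi0 : i = 0 := by omega
        subst hi0
        rw [hg0]


lemma pvOddCase (c : Nat) :
    generate_corbata_row_local (2 * (c : Int) + 3) = generate_corbata_row_local_alt (2 * (c : Int) + 3) := by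
  have h1 : ¬ (2 * (c : Int) + 3 = 1) := by omega
  have h2 : ¬ (2 * (c : Int) + 3 = 2) := by omega
  have hm : ¬ (PySem.Int.mod (2 * (c : Int) + 3) 2 = 0) := by
    rw [PySem.Int.mod_eq_emod_of_pos (by norm_num)]; omega
  have hk : PySem.Int.floordiv (2 * (c : Int) + 3 - 1) 2 = (c : Int) + 1 := by
    rw [PySem.Int.floordiv_eq_ediv_of_pos (by norm_num)]; omega
  simp only [generate_corbata_row_local, generate_corbata_row_local_alt, if_neg h1, if_neg h2,
    if_neg hm, hk]
  have e3 : (2 * (c : Int) + 3 - 1).toNat = 2 * c + 2 := by omega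
  have e4 : (2 * (c : Int) + 3 - 2) = 2 * (c : Int) + 1 := by ring
  have e6 : 2 * (c : Int) + 3 - 1 = 2 * (c : Int) + 2 := by ring
  rw [e3, e4, e6]
  have hps1 : PySem.List.pyRange ((c : Int) + 1 - 2) (-1) (-1)
      = (List.range c).map (fun j : Nat => (c : Int) - 1 - j) := by
    rw [show (c : Int) + 1 - 2 = (c : Int) - 1 by ring, PySem.List.pyRange_neg_one,
      show ((c : Int) - 1 - -1).toNat = c by omega]
  have hps2 : PySem.List.pyRange 2 ((c : Int) + 1 + 1) 1
      = (List.range c).map (fun j : Nat => 2 + (j : Int)) := by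
    rw [PySem.List.pyRange_one, show ((c : Int) + 1 + 1 - 2).toNat = c by omega]
  have hpsB : PySem.List.pyRange 0 (2 * (c : Int) + 2) 1
      = (List.range (2 * c + 2)).map (fun j : Nat => 0 + (j : Int)) := by
    rw [PySem.List.pyRange_one, show (2 * (c : Int) + 2 - 0).toNat = 2 * c + 2 by omega]
  have hrow0 : PySem.List.pySetD (List.replicate (2 * c + 2) (0 : Int)) 0 ((2 * (c : Int) + 1) ^ 2 + 2)
      = (List.replicate (2 * c + 2) (0 : Int)).set 0 ((2 * (c : Int) + 1) ^ 2 + 2) := by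
    rw [PySem.List.pySetD_of_nonneg _ _ (by norm_num)]; norm_num
  rw [hps1, hps2, hpsB, hrow0]
  set L : Int := (2 * (c : Int) + 1) ^ 2 + 2 with hL
  set g : Nat → Int := fun i => pvElemOdd L ((c : Int) + 1) (i : Int) with hg
  set row0 : List Int := (List.replicate (2 * c + 2) (0 : Int)).set 0 L with hrow0'
  have hgz : g 0 = L := by
    simp only [hg, pvElemOdd, Nat.cast_zero]
    rw [if_pos (by omega)]
    ring
  have hg0 : row0.getD 0 0 = g 0 := by
    rw [hgz, hrow0', List.getD_eq_getElem _ _ (by simp)]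
    simp
  have hdiff1 : ∀ j : Nat, j < ((List.range c).map (fun j : Nat => (c : Int) - 1 - j)).length →
      g (0 + j + 1) = g (0 + j) + (fun s => -2 * ((c : Int) + 1 + s)) (((List.range c).map (fun j : Nat => (c : Int) - 1 - j)).getD j 0) := by
    intro j hj
    simp only [List.length_map, List.length_range] at hj
    have hgd : ((List.range c).map (fun j : Nat => (c : Int) - 1 - j)).getD j 0 = (c : Int) - 1 - j := by
      rw [List.getD_eq_getElem _ _ (by simp [hj])]
      simp
    rw [hgd]
    simp only [hg, Nat.zero_add, pvElemOdd]
    rw [if_pos (by omega), if_pos (by omega)]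
    push_cast
    ring
  have h1loop := pvLoop (fun s => -2 * ((c : Int) + 1 + s)) g
    ((List.range c).map (fun j : Nat => (c : Int) - 1 - j)) (row0, 0) 0 (by norm_num) hg0 hdiff1
    (by simp only [hrow0', List.length_set, List.length_replicate, List.length_map,
      List.length_range]; omega)
  obtain ⟨ha1, ha2, ha3⟩ := h1loop
  set res1 : List Int × Int := List.foldl
      (fun (st : List Int × Int) s =>
        (PySem.List.pySetD st.1 (st.2 + 1) (PySem.List.pyGetD st.1 (st.2 + 1 - 1) 0 + -2 * ((c : Int) + 1 + s)), st.2 + 1))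
      (row0, 0) ((List.range c).map (fun j : Nat => (c : Int) - 1 - j)) with hres1
  -- the explicit middle step row[idx] = row[idx-1] + 2
  simp only [List.length_map, List.length_range, Nat.zero_add] at ha1
  have hgc : res1.1.getD c 0 = g c := by
    by_cases hc0 : c = 0
    · subst hc0
      rw [ha3, if_neg (by simp only [List.length_map, List.length_range]; omega)]
      exact hg0
    · rw [ha3, if_pos ⟨by omega, by simp only [List.length_map, List.length_range]; omega⟩]
  have hgmid : g c + 2 = g (c + 1) := by
    simp only [hg, pvElemOdd]
    rw [if_pos (by omega), if_neg (by omega)]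
    push_cast
    ring
  have hmidrow : PySem.List.pySetD res1.1 (res1.2 + 1) (PySem.List.pyGetD res1.1 (res1.2 + 1 - 1) 0 + 2)
      = res1.1.set (c + 1) (g (c + 1)) := by
    rw [ha1]
    rw [show ((c : Nat) : Int) + 1 - 1 = ((c : Nat) : Int) by ring]
    rw [PySem.List.pyGetD_natCast, hgc, hgmid]
    rw [show ((c : Nat) : Int) + 1 = ((c + 1 : Nat) : Int) by push_cast; ring]
    rw [PySem.List.pySetD_natCast]
  have hmididx : res1.2 + 1 = ((c + 1 : Nat) : Int) := by
    rw [ha1]; push_cast; ring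
  rw [hmidrow, hmididx]
  have hgc1 : (res1.1.set (c + 1) (g (c + 1))).getD (c + 1) 0 = g (c + 1) := by
    have hlt : c + 1 < res1.1.length := by
      rw [ha2]; simp only [hrow0', List.length_set, List.length_replicate]; omega
    rw [List.getD_eq_getElem _ _ (by simpa using hlt)]
    simp
  have hdiff2 : ∀ j : Nat, j < ((List.range c).map (fun j : Nat => 2 + (j : Int))).length →
      g (c + 1 + j + 1) = g (c + 1 + j) + (fun t => 2 * ((c : Int) + 1 + t)) (((List.range c).map (fun j : Nat => 2 + (j : Int))).getD j 0) := by
    intro j hj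
    simp only [List.length_map, List.length_range] at hj
    have hgd : ((List.range c).map (fun j : Nat => 2 + (j : Int))).getD j 0 = 2 + (j : Int) := by
      rw [List.getD_eq_getElem _ _ (by simp [hj])]
      simp
    rw [hgd]
    simp only [hg, pvElemOdd]
    rw [if_neg (by omega), if_neg (by omega)]
    push_cast
    ring
  have h2loop := pvLoop (fun t => 2 * ((c : Int) + 1 + t)) g
    ((List.range c).map (fun j : Nat => 2 + (j : Int)))
    (res1.1.set (c + 1) (g (c + 1)), ((c + 1 : Nat) : Int)) (c + 1) rfl hgc1 hdiff2
    (by simp only [List.length_set]; rw [ha2]; simp only [hrow0', List.length_set,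
      List.length_replicate, List.length_map, List.length_range]; omega)
  obtain ⟨hb1, hb2, hb3⟩ := h2loop
  apply List.ext_getElem
  · rw [hb2]
    simp only [List.length_set]
    rw [ha2]
    simp [hrow0']
  · intro i hi1 hi2
    have hilen : i < 2 * c + 2 := by
      rw [hb2] at hi1
      simp only [List.length_set] at hi1
      rw [ha2] at hi1
      simpa [hrow0'] using hi1
    rw [← List.getD_eq_getElem _ 0 hi1, hb3]
    have hrhs : (List.map (fun i => pvElemOdd L ((c : Int) + 1) i)
        ((List.range (2 * c + 2)).map (fun j : Nat => 0 + (j : Int))))[i] = g i := by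
      simp [hg]
    rw [hrhs]
    simp only [List.length_map, List.length_range]
    by_cases hc2 : c + 1 < i ∧ i ≤ c + 1 + c
    · rw [if_pos hc2]
    · rw [if_neg hc2]
      by_cases hic1 : i = c + 1
      · subst hic1
        exact hgc1
      · rw [List.getD_eq_getElem?_getD, List.getElem?_set_ne (by omega), ← List.getD_eq_getElem?_getD, ha3]
        by_cases hc1 : 0 < i ∧ i ≤ 0 + c
        · rw [if_pos (by simp only [List.length_map, List.length_range]; omega)]
        · rw [if_neg (by simp only [List.length_map, List.length_range]; omega)]
          have hi0 : i = 0 := by omega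
          subst hi0
          rw [hg0]

-- ===== VERDICT (by name: the statement is the Claim_ definition above) =====
theorem generate_corbata_row_local_spec : Claim_equal_generate_corbata_row_local := by
  intro r _ hpre
  unfold Pre_generate_corbata_row_local at hpre
  unfold Spec_generate_corbata_row_local
  by_cases h1 : r = 1
  · subst h1; decide
  by_cases h2 : r = 2
  · subst h2; decide
  by_cases he : r % 2 = 0
  · have hc : r = 2 * (((r - 4).toNat / 2 : Nat) : Int) + 4 := by omega
    rw [hc]
    exact pvEvenCase _
  · have hc : r = 2 * (((r - 3).toNat / 2 : Nat) : Int) + 3 := by omega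
    rw [hc]
    exact pvOddCase _
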